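-- pv_equiv track=rewrite | github.com/LukaSveigl/ULFRI-masters-coursework | year-2/semester-2/ana/ana-sem-02/implementations/ana_sem_02_dyn.py | run_dyn
-- ===== SOURCE A (Python) =====
-- def run_dyn(n: int, k: int, array: list) -> int:
--     """
--     Dynamic programming solution for the subset-sum problem.
--     This function computes the maximum sum of a subset of the array that is equal to k.
--
--     Args:
--         n (int): The number of elements in the array.
--         k (int): The sum goal.
--         array (list of int): The array of integers.
--
--     Returns:
--         int: The maximum sum of a subset of the array that is less than or equal to k.
--     """
--     # Initialize a DP table with dimensions (n+1) x (k+1)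
--     dp = [[0] * (k + 1) for _ in range(n + 1)]
--
--     for i in range(1, n + 1):
--         for j in range(k + 1):
--             # When filling out the DP table, we use the following logic:
--             # S(i, j) = max(S(i-1, j), S(i-1, j - a_i) + a_i)
--             # S(0, j) = 0 for all j (base case)
--             # S(i, 0) = 0 for all i (base case)
--             if array[i - 1] <= j:
--                 dp[i][j] = max(dp[i - 1][j], dp[i - 1][j - array[i - 1]] + array[i - 1])
--             else:
--                 dp[i][j] = dp[i - 1][j]
--
--     return dp[n][k], dp
-- ===== SOURCE B (Python) =====
-- def run_dyn(n: int, k: int, array: list) -> int: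
--     """Subset-sum via boolean reachability plus a prefix-max pass per row."""
--     width = k + 1
--
--     def prefix_row(reach):
--         row, cur = [], 0
--         for s in range(width):
--             if reach[s]:
--                 cur = s
--             row.append(cur)
--         return row
--
--     reach = [s == 0 for s in range(width)]
--     dp = [prefix_row(reach)]
--     for i in range(1, n + 1):
--         a = array[i - 1]
--         reach = [reach[s] or (a <= s and reach[s - a]) for s in range(width)]
--         dp.append(prefix_row(reach))
--     return dp[n][k], dp
-- ===== Notes on version B (the rewrite author's own statement) =====
-- stated objective: alternative
-- what changed: Replaces A's direct max-recurrence DP (dp[i][j] = max(dp[i-1][j], dp[i-1][j-a]+a)) by a boolean subset-sum reachability table updated per element, from which each dp row is produced by a running prefix-max pass; same O(n*k) table, maintained as booleans plus a second pass instead of running maxima.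
import Mathlib
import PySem

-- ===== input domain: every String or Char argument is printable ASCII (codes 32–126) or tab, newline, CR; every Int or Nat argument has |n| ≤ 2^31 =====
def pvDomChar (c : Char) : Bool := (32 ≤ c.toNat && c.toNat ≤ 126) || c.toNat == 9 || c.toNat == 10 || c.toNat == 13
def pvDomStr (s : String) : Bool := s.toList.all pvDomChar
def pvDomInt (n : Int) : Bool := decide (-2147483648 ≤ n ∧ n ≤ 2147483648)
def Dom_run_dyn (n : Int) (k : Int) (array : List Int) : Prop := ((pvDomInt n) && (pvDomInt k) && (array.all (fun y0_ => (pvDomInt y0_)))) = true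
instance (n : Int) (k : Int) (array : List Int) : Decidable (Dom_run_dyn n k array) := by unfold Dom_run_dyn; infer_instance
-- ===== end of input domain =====

-- B replaces A's direct max-recurrence DP by a boolean reachability table plus a prefix-max
-- pass per row (a different decomposition of the same table; no speed claim).

-- ===== PORT A =====
-- xs[i] reads; under Pre_run_dyn every index A uses is in range, so the default is never taken
def pvGetI (xs : List Int) (i : Int) : Int := PySem.List.pyGetD xs i 0
def pvGetB (xs : List Bool) (i : Int) : Bool := PySem.List.pyGetD xs i false
def pvGetR (xs : List (List Int)) (i : Int) : List Int := PySem.List.pyGetD xs i []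

def run_dyn (n : Int) (k : Int) (array : List Int) : Int × List (List Int) :=
  let dp := (PySem.List.pyRange 1 (n+1) 1).foldl
    (fun dp i =>
      let a := pvGetI array (i-1)
      let prev := pvGetR dp (i-1)
      dp ++ [(PySem.List.pyRange 0 (k+1) 1).map (fun j =>
        if a ≤ j then max (pvGetI prev j) (pvGetI prev (j-a) + a) else pvGetI prev j)])
    [List.replicate (k+1).toNat 0]
  (pvGetI (pvGetR dp n) k, dp)

-- ===== PORT B =====
def pvPrefixRow (k : Int) (reach : List Bool) : List Int :=
  ((PySem.List.pyRange 0 (k+1) 1).foldl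
    (fun (st : List Int × Int) s =>
      let cur := if pvGetB reach s then s else st.2
      (st.1 ++ [cur], cur)) ([], 0)).1

def run_dyn_alt (n : Int) (k : Int) (array : List Int) : Int × List (List Int) :=
  let reach0 := (PySem.List.pyRange 0 (k+1) 1).map (fun s => s == (0:Int))
  let st := (PySem.List.pyRange 1 (n+1) 1).foldl
    (fun (st : List Bool × List (List Int)) i =>
      let a := pvGetI array (i-1)
      let reach := (PySem.List.pyRange 0 (k+1) 1).map
        (fun s => pvGetB st.1 s || (decide (a ≤ s) && pvGetB st.1 (s - a)))
      (reach, st.2 ++ [pvPrefixRow k reach]))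
    (reach0, [pvPrefixRow k reach0])
  (pvGetI (pvGetR st.2 n) k, st.2)

-- ===== PRECONDITION & SPEC =====
-- Pre_ excludes exactly the inputs where A raises IndexError: negative n or k, n beyond the
-- array's length, or a negative element among the first n (then dp[i-1][j - a] overflows the row).
def Pre_run_dyn (n : Int) (k : Int) (array : List Int) : Prop :=
  0 ≤ n ∧ n ≤ (array.length : Int) ∧ 0 ≤ k ∧ ∀ x ∈ array.take n.toNat, 0 ≤ x
instance (n : Int) (k : Int) (array : List Int) : Decidable (Pre_run_dyn n k array) := by
  unfold Pre_run_dyn; infer_instance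

def pvWitness_run_dyn : Int × Int × List Int := (3, 5, [2, 3, 4])

def Spec_run_dyn (n : Int) (k : Int) (array : List Int) (out : Int × List (List Int)) : Prop := out = run_dyn_alt n k array
instance (n : Int) (k : Int) (array : List Int) (out : Int × List (List Int)) : Decidable (Spec_run_dyn n k array out) := by unfold Spec_run_dyn; infer_instance

-- ===== CLAIM (what is proved, stated in full; the proofs are below) =====
def Claim_equal_run_dyn : Prop := ∀ (n : Int) (k : Int) (array : List Int), Dom_run_dyn n k array → Pre_run_dyn n k array → Spec_run_dyn n k array (run_dyn n k array)

-- ===== LEMMAS AND PROOFS =====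

-- prefix maximum of a boolean reachability predicate: largest s ≤ j with r s, else 0
def pvPM (r : Nat → Bool) : Nat → Nat
  | 0 => 0
  | j+1 => if r (j+1) then j+1 else pvPM r j

-- one subset-sum step on the reachability predicate
def pvStepR (A : Nat) (r : Nat → Bool) : Nat → Bool := fun s => r s || (decide (A ≤ s) && r (s - A))

-- reachability after the first m elements of array
def pvRN (array : List Int) : Nat → Nat → Bool
  | 0 => fun s => decide (s = 0)
  | m+1 => pvStepR (pvGetI array (m:Int)).toNat (pvRN array m)

def pvRow (array : List Int) (K m : Nat) : List Int :=
  List.map (fun j : Nat => ((pvPM (pvRN array m) j : Nat) : Int)) (List.range (K+1))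
def pvReachL (array : List Int) (K m : Nat) : List Bool :=
  List.map (pvRN array m) (List.range (K+1))
def pvRows (array : List Int) (K m : Nat) : List (List Int) :=
  List.map (pvRow array K) (List.range (m+1))

lemma pvPM_le (r : Nat → Bool) (j : Nat) : pvPM r j ≤ j := by
  induction j with
  | zero => simp [pvPM]
  | succ j ih => simp only [pvPM]; split <;> omega

lemma pvPM_self (r : Nat → Bool) (j : Nat) (h : r j = true) : pvPM r j = j := by
  cases j with
  | zero => rfl
  | succ j => simp [pvPM, h]

lemma pvRN_zero_true (array : List Int) (m : Nat) : pvRN array m 0 = true := by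
  induction m with
  | zero => simp [pvRN]
  | succ m ih => simp [pvRN, pvStepR, ih]

lemma pvPM_base (j : Nat) : pvPM (fun s => decide (s = 0)) j = 0 := by
  induction j with
  | zero => rfl
  | succ j ih => simp [pvPM, ih]

lemma pvPM_step (r : Nat → Bool) (h0 : r 0 = true) (A j : Nat) :
    pvPM (pvStepR A r) j = if A ≤ j then max (pvPM r j) (pvPM r (j - A) + A) else pvPM r j := by
  induction j with
  | zero =>
    simp only [pvPM]
    split
    · next hA =>
      have : A = 0 := by omega
      subst this
      simp [pvPM]
    · rfl
  | succ j ih =>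
    by_cases hA1 : A ≤ j + 1
    · rcases Nat.lt_or_ge j A with hAj | hAj
      · have hA : A = j + 1 := by omega
        subst hA
        have hstep : pvStepR (j+1) r (j+1) = true := by simp [pvStepR, h0]
        have hle := pvPM_le r (j+1)
        rw [pvPM_self _ _ hstep, if_pos hA1]
        have h1 : j + 1 - (j + 1) = 0 := by omega
        have h2 : pvPM r 0 = 0 := rfl
        rw [h1, h2, Nat.zero_add, Nat.max_eq_right hle]
      · by_cases h1 : r (j+1) = true
        · have hstep : pvStepR A r (j+1) = true := by simp [pvStepR, h1]
          have hle := pvPM_le r (j + 1 - A)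
          rw [pvPM_self _ _ hstep, if_pos hA1, pvPM_self r (j+1) h1,
            Nat.max_eq_left (by omega)]
        · have h1' : r (j+1) = false := by simpa using h1
          by_cases h2 : r (j + 1 - A) = true
          · have hstep : pvStepR A r (j+1) = true := by simp [pvStepR, hA1, h2]
            have hle := pvPM_le r j
            rw [pvPM_self _ _ hstep, if_pos hA1, pvPM_self r (j+1-A) h2]
            have hs : j + 1 - A + A = j + 1 := by omega
            rw [hs]
            have hpm : pvPM r (j+1) = pvPM r j := by simp [pvPM, h1']
            rw [hpm, Nat.max_eq_right (by omega)]
          · have h2' : r (j + 1 - A) = false := by simpa using h2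
            have hstep : pvStepR A r (j+1) = false := by simp [pvStepR, h1', h2']
            have hsub : j + 1 - A = (j - A) + 1 := by omega
            have h4 : r ((j - A) + 1) = false := hsub ▸ h2'
            have hL : pvPM (pvStepR A r) (j+1) = pvPM (pvStepR A r) j := by
              simp [pvPM, hstep]
            rw [hL, ih, if_pos hAj, if_pos hA1, hsub]
            have hpm1 : pvPM r (j+1) = pvPM r j := by simp [pvPM, h1']
            have hpm2 : pvPM r ((j - A) + 1) = pvPM r (j - A) := by simp [pvPM, h4]
            rw [hpm1, hpm2]
    · have hA2 : ¬ A ≤ j := by omega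
      have hstep : pvStepR A r (j+1) = r (j+1) := by simp [pvStepR, hA1]
      simp only [pvPM, hstep, ih, if_neg hA1, if_neg hA2]

lemma pvRange_cast (K : Nat) :
    PySem.List.pyRange 0 ((K:Int)+1) 1 = List.map (fun j : Nat => (j:Int)) (List.range (K+1)) := by
  have h : ((K:Int)+1) = ((K+1 : Nat) : Int) := by push_cast; ring
  rw [h, PySem.List.pyRange_zero_natCast]

lemma getI_row (array : List Int) (K m j : Nat) (hj : j ≤ K) :
    pvGetI (pvRow array K m) (j:Int) = ((pvPM (pvRN array m) j : Nat) : Int) := by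
  simp only [pvGetI, pvRow, PySem.List.pyGetD_natCast]
  exact PySem.List.getD_map_range _ _ _ _ (by omega)

lemma getB_reach (array : List Int) (K m s : Nat) (hs : s ≤ K) :
    pvGetB (pvReachL array K m) (s:Int) = pvRN array m s := by
  simp only [pvGetB, pvReachL, PySem.List.pyGetD_natCast]
  exact PySem.List.getD_map_range _ _ _ _ (by omega)

lemma getR_rows (array : List Int) (K m i : Nat) (hi : i ≤ m) :
    pvGetR (pvRows array K m) (i:Int) = pvRow array K i := by
  simp only [pvGetR, pvRows, PySem.List.pyGetD_natCast]
  exact PySem.List.getD_map_range _ _ _ _ (by omega)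

lemma pvRow_zero (array : List Int) (K : Nat) :
    pvRow array K 0 = List.replicate (K+1) 0 := by
  simp [pvRow, pvRN, pvPM_base, List.map_const']

lemma rowA_step (array : List Int) (K m : Nat) (ha0 : 0 ≤ pvGetI array (m:Int)) :
    (PySem.List.pyRange 0 ((K:Int)+1) 1).map (fun j =>
        if pvGetI array (m:Int) ≤ j
        then max (pvGetI (pvRow array K m) j) (pvGetI (pvRow array K m) (j - pvGetI array (m:Int)) + pvGetI array (m:Int))
        else pvGetI (pvRow array K m) j)
      = pvRow array K (m+1) := by
  rw [pvRange_cast, List.map_map]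
  apply List.map_congr_left
  intro j hj
  have hjK : j < K + 1 := List.mem_range.mp hj
  have haA : pvGetI array (m:Int) = (((pvGetI array (m:Int)).toNat : Nat) : Int) :=
    (Int.toNat_of_nonneg ha0).symm
  have hRN : pvRN array (m+1) = pvStepR (pvGetI array (m:Int)).toNat (pvRN array m) := rfl
  simp only [Function.comp_apply]
  rw [show pvPM (pvRN array (m+1)) j
        = pvPM (pvStepR (pvGetI array (m:Int)).toNat (pvRN array m)) j from by rw [hRN],
    pvPM_step _ (pvRN_zero_true array m)]
  by_cases hA : (pvGetI array (m:Int)).toNat ≤ j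
  · have h1 : pvGetI array (m:Int) ≤ (j:Int) := by omega
    have hsub : (j:Int) - pvGetI array (m:Int) = ((j - (pvGetI array (m:Int)).toNat : Nat) : Int) := by
      omega
    rw [if_pos h1, if_pos hA, getI_row array K m j (by omega), hsub,
      getI_row array K m _ (by omega)]
    rw [Nat.cast_max]
    push_cast
    omega
  · have h1 : ¬ pvGetI array (m:Int) ≤ (j:Int) := by omega
    rw [if_neg h1, if_neg hA, getI_row array K m j (by omega)]

lemma reach_step (array : List Int) (K m : Nat) (ha0 : 0 ≤ pvGetI array (m:Int)) :
    (PySem.List.pyRange 0 ((K:Int)+1) 1).map (fun s =>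
        pvGetB (pvReachL array K m) s ||
          (decide (pvGetI array (m:Int) ≤ s) && pvGetB (pvReachL array K m) (s - pvGetI array (m:Int))))
      = pvReachL array K (m+1) := by
  rw [pvRange_cast, List.map_map]
  apply List.map_congr_left
  intro s hs
  have hsK : s < K + 1 := List.mem_range.mp hs
  have hRN : pvRN array (m+1) s
      = (pvRN array m s || (decide ((pvGetI array (m:Int)).toNat ≤ s)
          && pvRN array m (s - (pvGetI array (m:Int)).toNat))) := rfl
  simp only [Function.comp_apply]
  rw [hRN, getB_reach array K m s (by omega)]
  by_cases hA : (pvGetI array (m:Int)).toNat ≤ s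
  · have h1 : pvGetI array (m:Int) ≤ (s:Int) := by omega
    have hsub : (s:Int) - pvGetI array (m:Int) = ((s - (pvGetI array (m:Int)).toNat : Nat) : Int) := by
      omega
    rw [hsub, getB_reach array K m _ (by omega)]
    simp [h1, hA]
  · have h1 : ¬ pvGetI array (m:Int) ≤ (s:Int) := by omega
    simp [h1, hA]

lemma reach0_eq (array : List Int) (K : Nat) :
    (PySem.List.pyRange 0 ((K:Int)+1) 1).map (fun s => s == (0:Int)) = pvReachL array K 0 := by
  rw [pvRange_cast, List.map_map]
  apply List.map_congr_left
  intro s _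
  by_cases h : s = 0 <;> simp [pvRN, h]

lemma prefixRow_aux (array : List Int) (K m w : Nat) (hw : w ≤ K + 1) :
    (List.map (fun s : Nat => (s:Int)) (List.range w)).foldl
      (fun (st : List Int × Int) s =>
        let cur := if pvGetB (pvReachL array K m) s then s else st.2
        (st.1 ++ [cur], cur)) ([], 0)
    = (List.map (fun j : Nat => ((pvPM (pvRN array m) j : Nat) : Int)) (List.range w),
       ((pvPM (pvRN array m) (w-1) : Nat) : Int)) := by
  induction w with
  | zero => simp [pvPM]
  | succ w ih =>
    rw [List.range_succ, List.map_append, List.foldl_append, ih (by omega)]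
    simp only [List.map_cons, List.map_nil, List.foldl_cons, List.foldl_nil]
    rw [getB_reach array K m w (by omega)]
    have hcur : (if pvRN array m w = true then ((w:Nat):Int)
        else ((pvPM (pvRN array m) (w-1) : Nat) : Int)) = ((pvPM (pvRN array m) w : Nat) : Int) := by
      cases w with
      | zero => simp [pvRN_zero_true, pvPM]
      | succ w => by_cases h : pvRN array m (w+1) = true <;> simp [pvPM, h]
    simp only [hcur]
    simp

lemma prefixRow_spec (array : List Int) (K m : Nat) :
    pvPrefixRow (K:Int) (pvReachL array K m) = pvRow array K m := by
  unfold pvPrefixRow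
  rw [pvRange_cast, prefixRow_aux array K m (K+1) le_rfl]
  rfl

lemma foldA (array : List Int) (K : Nat) (m : Nat)
    (H : ∀ j : Nat, j < m → 0 ≤ pvGetI array (j:Int)) :
    (PySem.List.pyRange 1 ((m:Int)+1) 1).foldl
      (fun dp i =>
        let a := pvGetI array (i-1)
        let prev := pvGetR dp (i-1)
        dp ++ [(PySem.List.pyRange 0 ((K:Int)+1) 1).map (fun j =>
          if a ≤ j then max (pvGetI prev j) (pvGetI prev (j-a) + a) else pvGetI prev j)])
      [pvRow array K 0]
    = pvRows array K m := by
  induction m with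
  | zero =>
    rw [show ((0:Nat):Int)+1 = 1 from by simp, PySem.List.pyRange_one_eq_nil (le_refl 1)]
    simp [pvRows, List.range_succ]
  | succ m ih =>
    have hpeel : PySem.List.pyRange 1 (((m+1:Nat):Int)+1) 1
        = PySem.List.pyRange 1 ((m:Int)+1) 1 ++ [(m:Int)+1] := by
      have h : (((m+1:Nat):Int)+1) = ((m:Int)+1)+1 := by push_cast; ring
      rw [h, PySem.List.pyRange_one_succ_right (by omega)]
    rw [hpeel, List.foldl_append, ih (fun j hj => H j (by omega))]
    simp only [List.foldl_cons, List.foldl_nil]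
    have hi : ((m:Int)+1)-1 = (m:Int) := by ring
    simp only [hi]
    rw [getR_rows array K m m le_rfl, rowA_step array K m (H m (by omega))]
    simp [pvRows, List.range_succ]

lemma foldB (array : List Int) (K : Nat) (m : Nat)
    (H : ∀ j : Nat, j < m → 0 ≤ pvGetI array (j:Int)) :
    (PySem.List.pyRange 1 ((m:Int)+1) 1).foldl
      (fun (st : List Bool × List (List Int)) i =>
        let a := pvGetI array (i-1)
        let reach := (PySem.List.pyRange 0 ((K:Int)+1) 1).map
          (fun s => pvGetB st.1 s || (decide (a ≤ s) && pvGetB st.1 (s - a)))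
        (reach, st.2 ++ [pvPrefixRow (K:Int) reach]))
      (pvReachL array K 0, [pvRow array K 0])
    = (pvReachL array K m, pvRows array K m) := by
  induction m with
  | zero =>
    rw [show ((0:Nat):Int)+1 = 1 from by simp, PySem.List.pyRange_one_eq_nil (le_refl 1)]
    simp [pvRows, List.range_succ]
  | succ m ih =>
    have hpeel : PySem.List.pyRange 1 (((m+1:Nat):Int)+1) 1
        = PySem.List.pyRange 1 ((m:Int)+1) 1 ++ [(m:Int)+1] := by
      have h : (((m+1:Nat):Int)+1) = ((m:Int)+1)+1 := by push_cast; ring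
      rw [h, PySem.List.pyRange_one_succ_right (by omega)]
    rw [hpeel, List.foldl_append, ih (fun j hj => H j (by omega))]
    simp only [List.foldl_cons, List.foldl_nil]
    have hi : ((m:Int)+1)-1 = (m:Int) := by ring
    simp only [hi]
    rw [reach_step array K m (H m (by omega)), prefixRow_spec array K (m+1)]
    simp [pvRows, List.range_succ]

-- ===== VERDICT (by name: the statement is the Claim_ definition above) =====
theorem run_dyn_spec : Claim_equal_run_dyn := by
  intro n k array _ hpre
  obtain ⟨hn0, hnlen, hk0, hpos⟩ := hpre
  obtain ⟨N, rfl⟩ : ∃ N : Nat, n = (N:Int) := ⟨n.toNat, (Int.toNat_of_nonneg hn0).symm⟩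
  obtain ⟨K, rfl⟩ : ∃ K : Nat, k = (K:Int) := ⟨k.toNat, (Int.toNat_of_nonneg hk0).symm⟩
  simp only [Int.toNat_natCast] at hpos
  have H : ∀ j : Nat, j < N → 0 ≤ pvGetI array (j:Int) := by
    intro j hj
    have hjl : j < array.length := by omega
    have h1 : j < (array.take N).length := by
      simp only [List.length_take]
      omega
    have hmem : array[j] ∈ array.take N := by
      have h2 : (array.take N)[j]'h1 = array[j] := List.getElem_take
      rw [← h2]
      exact List.getElem_mem h1
    have hval : pvGetI array (j:Int) = array[j] := by
      simp only [pvGetI, PySem.List.pyGetD_natCast]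
      rw [List.getD_eq_getElem?_getD, List.getElem?_eq_getElem hjl]
      rfl
    rw [hval]
    exact hpos _ hmem
  simp only [Spec_run_dyn, run_dyn, run_dyn_alt]
  rw [show (((K:Nat):Int)+1).toNat = K+1 from by omega, ← pvRow_zero array K,
    reach0_eq array K, prefixRow_spec array K 0, foldA array K N H, foldB array K N H]
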